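-- pv_equiv track=rewrite | github.com/luvaymoiz/UGCC | routes/operationsafeguard.py | decode_index_parity_word
-- ===== SOURCE A (Python) =====
-- def decode_index_parity_word(w: str) -> str:
--     # inverse of encode_index_parity_word
--     n = len(w)
--     k = (n + 1) // 2  # number of evens
--     evens, odds = w[:k], w[k:]
--     out = []
--     for i in range(n):
--         out.append(evens[i//2] if i % 2 == 0 else odds[i//2])
--     return "".join(out)
-- ===== SOURCE B (Python) =====
-- def decode_index_parity_word(w: str) -> str:
--     # consume the two halves in parallel: one even char, then one odd if any remain
--     k = (len(w) + 1) // 2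
--     odds = iter(w[k:])
--     out = []
--     for e in w[:k]:
--         out.append(e)
--         o = next(odds, None)
--         if o is None:
--             break
--         out.append(o)
--     return "".join(out)
-- ===== Notes on version B (the rewrite author's own statement) =====
-- stated objective: alternative
-- what changed: Replaces the range(n) loop with i%2 parity branch and i//2 indexing by a single parallel consumption of the two halves: iterate the even half, pulling one odd character via an iterator after each even one until the odds are exhausted.
import Mathlib
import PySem

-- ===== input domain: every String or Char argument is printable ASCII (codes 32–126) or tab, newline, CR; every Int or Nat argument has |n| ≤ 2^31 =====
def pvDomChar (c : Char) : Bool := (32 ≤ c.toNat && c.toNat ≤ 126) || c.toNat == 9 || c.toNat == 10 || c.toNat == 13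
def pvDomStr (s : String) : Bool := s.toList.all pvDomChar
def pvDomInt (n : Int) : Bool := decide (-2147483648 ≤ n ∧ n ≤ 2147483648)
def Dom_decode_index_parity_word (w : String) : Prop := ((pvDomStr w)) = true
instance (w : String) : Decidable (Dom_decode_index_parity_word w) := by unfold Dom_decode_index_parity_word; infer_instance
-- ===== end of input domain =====

-- B consumes the two halves in parallel (one even char, then one odd while any remain)
-- instead of A's range(n) loop with a parity branch and i//2 indexing; same cost,
-- a different decomposition.

-- ===== PORT A =====
-- n, k are nonnegative, so Nat arithmetic matches Python's // here; the indices
-- evens[i//2] / odds[i//2] are always in range, so pyGetD's default is unreachable.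
def decode_index_parity_word (w : String) : String :=
  let l := w.toList
  let n := l.length
  let k := (n + 1) / 2
  let evens := PySem.List.slice l none (some (k : Int))
  let odds := PySem.List.slice l (some (k : Int)) none
  let out := (List.range n).foldl
    (fun acc i =>
      acc ++ [if i % 2 = 0 then PySem.List.pyGetD evens ((i / 2 : Nat) : Int) ' '
              else PySem.List.pyGetD odds ((i / 2 : Nat) : Int) ' ']) []
  String.mk out

-- ===== PORT B =====
-- Source B's loop over the even half with 'next(odds, None)' and 'break': a structural
-- recursion consuming one even, then one odd if the odd iterator still has one,
-- stopping (dropping the remaining evens) when the odds run out.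
def pvConsume : List Char → List Char → List Char
  | [], _ => []
  | e :: es, [] => [e]
  | e :: es, o :: os => e :: o :: pvConsume es os

def decode_index_parity_word_alt (w : String) : String :=
  let l := w.toList
  let k := (l.length + 1) / 2
  String.mk (pvConsume (PySem.List.slice l none (some (k : Int)))
                       (PySem.List.slice l (some (k : Int)) none))

-- ===== PRECONDITION & SPEC =====
def Spec_decode_index_parity_word (w : String) (out : String) : Prop := out = decode_index_parity_word_alt w
instance (w : String) (out : String) : Decidable (Spec_decode_index_parity_word w out) := by unfold Spec_decode_index_parity_word; infer_instance

-- ===== CLAIM (what is proved, stated in full; the proofs are below) =====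
def Claim_equal_decode_index_parity_word : Prop := ∀ (w : String), Dom_decode_index_parity_word w → Spec_decode_index_parity_word w (decode_index_parity_word w)

-- ===== LEMMAS AND PROOFS =====

-- A's foldl accumulates exactly the map of the loop body over the range
theorem pv_foldl_append_map {α β : Type} (f : α → β) :
    ∀ (l : List α) (acc : List β),
      l.foldl (fun acc x => acc ++ [f x]) acc = acc ++ l.map f := by
  intro l
  induction l with
  | nil => intro acc; simp
  | cons x xs ih => intro acc; simp [List.foldl_cons, ih]

-- core: the indexed interleaving of two near-equal halves equals the parallel consumption
theorem pv_interleave (d : Char) :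
    ∀ (O E : List Char), O.length ≤ E.length → E.length ≤ O.length + 1 →
      (List.range (E.length + O.length)).map
          (fun i => if i % 2 = 0 then E.getD (i / 2) d else O.getD (i / 2) d)
        = pvConsume E O := by
  intro O
  induction O with
  | nil =>
    intro E h1 h2
    cases E with
    | nil => simp [pvConsume]
    | cons e E' =>
      have hE' : E' = [] := by
        have hlen : E'.length = 0 := by simp only [List.length_cons, List.length_nil] at h2; omega
        exact List.eq_nil_of_length_eq_zero hlen
      subst hE'
      simp [pvConsume, List.range_succ]
  | cons o O' ih =>
    intro E h1 h2
    obtain ⟨e, E', rfl⟩ : ∃ e E', E = e :: E' := by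
      cases E with
      | nil => simp at h1
      | cons a l => exact ⟨a, l, rfl⟩
    simp only [List.length_cons] at h1 h2 ⊢
    have hrange : List.range (E'.length + O'.length + 2)
        = 0 :: 1 :: (List.range (E'.length + O'.length)).map (fun i => i + 2) := by
      rw [List.range_succ_eq_map, List.range_succ_eq_map]
      simp [List.map_map, Function.comp]
    rw [show (E'.length + 1 + (O'.length + 1)) = E'.length + O'.length + 2 by omega, hrange]
    simp only [List.map_cons, List.map_map]
    have hfun : ((fun i => if i % 2 = 0 then (e :: E').getD (i / 2) d
                    else (o :: O').getD (i / 2) d) ∘ (fun i => i + 2))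
        = (fun i => if i % 2 = 0 then E'.getD (i / 2) d else O'.getD (i / 2) d) := by
      funext i
      have hm : (i + 2) % 2 = i % 2 := by omega
      have hd : (i + 2) / 2 = i / 2 + 1 := by omega
      simp [Function.comp, hm, hd]
    rw [hfun, ih E' (by omega) (by omega)]
    simp [pvConsume]

theorem decode_index_parity_word_eq (w : String) :
    decode_index_parity_word w = decode_index_parity_word_alt w := by
  unfold decode_index_parity_word decode_index_parity_word_alt
  simp only [PySem.List.slice_to_natCast, PySem.List.slice_from_natCast,
    PySem.List.pyGetD_natCast, pv_foldl_append_map, List.nil_append]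
  set l := w.toList with hl
  set n := l.length with hn
  set k := (n + 1) / 2 with hk
  have hkn : k ≤ n := by omega
  have hE : (l.take k).length = k := by simp; omega
  have hO : (l.drop k).length = n - k := by simp; rw [hn]
  have h := pv_interleave ' ' (l.drop k) (l.take k) (by omega) (by omega)
  rw [hE, hO, show k + (n - k) = n by omega] at h
  rw [h]

-- ===== VERDICT (by name: the statement is the Claim_ definition above) =====
theorem decode_index_parity_word_spec : Claim_equal_decode_index_parity_word := by
  intro w _
  exact decode_index_parity_word_eq w
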